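-- pv_equiv track=rewrite | github.com/juleshenry/vakyume | vakyume_master.py | extract_method_blocks
-- ===== SOURCE A (Python) =====
-- def extract_method_blocks(code_text):
--     lines = code_text.splitlines()
--     blocks = {}
--     i = 0
--     while i < len(lines):
--         line = lines[i]
--         stripped = line.lstrip()
--         if stripped.startswith("def eqn_"):
--             name = stripped.split("def ", 1)[1].split("(", 1)[0].strip()
--             start = i
--             if i > 0 and lines[i - 1].lstrip().startswith("@"):
--                 start = i - 1
--             end = i + 1
--             while end < len(lines):
--                 nxt = lines[end]
--                 nxt_stripped = nxt.lstrip()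
--                 if nxt_stripped.startswith("def eqn_") or nxt_stripped.startswith(
--                     "@staticmethod"
--                 ):
--                     break
--                 end += 1
--             block_lines = lines[start:end]
--             blocks[name] = block_lines
--             i = end
--             continue
--         i += 1
--     return blocks
-- ===== SOURCE B (Python) =====
-- def extract_method_blocks(code_text):
--     lines = code_text.splitlines()
--     bounds = [i for i, l in enumerate(lines)
--               if l.lstrip().startswith("def eqn_") or l.lstrip().startswith("@staticmethod")]
--     blocks = {}
--     for i, end in zip(bounds, bounds[1:] + [len(lines)]):
--         s = lines[i].lstrip()
--         if s.startswith("def eqn_"):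
--             name = s.split("def ", 1)[1].split("(", 1)[0].strip()
--             start = i - 1 if i > 0 and lines[i - 1].lstrip().startswith("@") else i
--             blocks[name] = lines[start:end]
--     return blocks
-- ===== Notes on version B (the rewrite author's own statement) =====
-- stated objective: simpler
-- what changed: A's index-jumping while loop with a nested end-scan is replaced by one enumerate pass collecting the boundary line indices, then a single fold over consecutive boundary pairs that slices each equation-method block.
import Mathlib
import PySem

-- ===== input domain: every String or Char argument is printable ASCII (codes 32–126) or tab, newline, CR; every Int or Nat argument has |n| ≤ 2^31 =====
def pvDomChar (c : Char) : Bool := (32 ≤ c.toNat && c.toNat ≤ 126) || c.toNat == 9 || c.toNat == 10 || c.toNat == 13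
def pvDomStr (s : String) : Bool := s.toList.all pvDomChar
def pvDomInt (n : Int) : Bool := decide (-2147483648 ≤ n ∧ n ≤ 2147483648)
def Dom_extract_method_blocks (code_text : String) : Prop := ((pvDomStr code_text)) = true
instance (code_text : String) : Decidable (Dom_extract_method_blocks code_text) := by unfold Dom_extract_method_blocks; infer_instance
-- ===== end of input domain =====

-- B replaces A's index-jumping while loop (with its inner boundary scan) by one boundary-index
-- pass followed by a fold pairing each boundary with its successor (simpler decomposition; same cost).

-- ===== PORT A =====
-- inner 'while end < len(lines)' scan of A
def pvScanEnd (lines : List String) (e : Nat) : Nat :=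
  if _h : e < lines.length then
    let nxt := lines[e]
    let nxt_stripped := PySem.Str.lstrip nxt
    if PySem.Str.startswith nxt_stripped "def eqn_" || PySem.Str.startswith nxt_stripped "@staticmethod" then
      e
    else
      pvScanEnd lines (e + 1)
  else e
termination_by lines.length - e

-- cited by pvALoop's decreasing_by (the jump 'i = end' goes strictly forward)
theorem pvScanEnd_le (lines : List String) (e : Nat) : e ≤ pvScanEnd lines e := by
  have H : ∀ n e, lines.length - e ≤ n → e ≤ pvScanEnd lines e := by
    intro n
    induction n with
    | zero =>
      intro e he
      unfold pvScanEnd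
      split
      · omega
      · exact le_refl e
    | succ n ih =>
      intro e he
      unfold pvScanEnd
      split
      · dsimp only
        split
        · exact le_refl e
        · have := ih (e + 1) (by omega)
          omega
      · exact le_refl e
  exact H (lines.length - e) e (le_refl _)

def pvALoop (lines : List String) (blocks : PySem.Dict String (List String)) (i : Nat) :
    PySem.Dict String (List String) :=
  if _h : i < lines.length then
    let line := lines[i]
    let stripped := PySem.Str.lstrip line
    if PySem.Str.startswith stripped "def eqn_" then
      let name := PySem.Str.strip
        (((PySem.Str.splitMax? (((PySem.Str.splitMax? stripped "def " 1).getD []).getD 1 "") "(" 1).getD []).getD 0 "")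
      let start := if 0 < i ∧ PySem.Str.startswith (PySem.Str.lstrip (lines.getD (i - 1) "")) "@" = true then i - 1 else i
      let e := pvScanEnd lines (i + 1)
      let block_lines := PySem.List.slice lines (some (start : Int)) (some (e : Int))
      pvALoop lines (blocks.insert name block_lines) e
    else
      pvALoop lines blocks (i + 1)
  else blocks
termination_by lines.length - i
decreasing_by
  · have := pvScanEnd_le lines (i + 1); omega
  · omega

def extract_method_blocks (code_text : String) : List (String × List String) :=
  (pvALoop (PySem.Str.splitlines code_text) PySem.Dict.empty 0).items

-- ===== PORT B =====
def extract_method_blocks_alt (code_text : String) : List (String × List String) :=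
  let lines := PySem.Str.splitlines code_text
  let bounds := ((PySem.List.enumerate lines 0).filter
      (fun p => PySem.Str.startswith (PySem.Str.lstrip p.2) "def eqn_" ||
                PySem.Str.startswith (PySem.Str.lstrip p.2) "@staticmethod")).map (·.1)
  let blocks := (bounds.zip (bounds.drop 1 ++ [(lines.length : Int)])).foldl
    (fun acc p =>
      let s := PySem.Str.lstrip (PySem.List.pyGetD lines p.1 "")
      if PySem.Str.startswith s "def eqn_" then
        let name := PySem.Str.strip
          (((PySem.Str.splitMax? (((PySem.Str.splitMax? s "def " 1).getD []).getD 1 "") "(" 1).getD []).getD 0 "")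
        let start := if 0 < p.1 ∧ PySem.Str.startswith (PySem.Str.lstrip (PySem.List.pyGetD lines (p.1 - 1) "")) "@" = true then p.1 - 1 else p.1
        acc.insert name (PySem.List.slice lines (some start) (some p.2))
      else acc)
    PySem.Dict.empty
  blocks.items

-- ===== PRECONDITION & SPEC =====
def Spec_extract_method_blocks (code_text : String) (out : List (String × List String)) : Prop := out = extract_method_blocks_alt code_text
instance (code_text : String) (out : List (String × List String)) : Decidable (Spec_extract_method_blocks code_text out) := by unfold Spec_extract_method_blocks; infer_instance

-- ===== CLAIM (what is proved, stated in full; the proofs are below) =====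
def Claim_equal_extract_method_blocks : Prop := ∀ (code_text : String), Dom_extract_method_blocks code_text → Spec_extract_method_blocks code_text (extract_method_blocks code_text)

-- ===== LEMMAS AND PROOFS =====
def pvBd (l : String) : Bool :=
  PySem.Str.startswith (PySem.Str.lstrip l) "def eqn_" ||
  PySem.Str.startswith (PySem.Str.lstrip l) "@staticmethod"

-- the per-boundary step of B, over Nat indices
def pvStep (lines : List String) (acc : PySem.Dict String (List String)) (p : Nat × Nat) :
    PySem.Dict String (List String) :=
  if PySem.Str.startswith (PySem.Str.lstrip (lines.getD p.1 "")) "def eqn_" then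
    acc.insert
      (PySem.Str.strip
        (((PySem.Str.splitMax? (((PySem.Str.splitMax? (PySem.Str.lstrip (lines.getD p.1 "")) "def " 1).getD []).getD 1 "") "(" 1).getD []).getD 0 ""))
      (PySem.List.slice lines
        (some ((if 0 < p.1 ∧ PySem.Str.startswith (PySem.Str.lstrip (lines.getD (p.1 - 1) "")) "@" = true then p.1 - 1 else p.1 : Nat) : Int))
        (some (p.2 : Int)))
  else acc

-- boundary indices ≥ i
def pvBIdx (lines : List String) (i : Nat) : List Nat :=
  if h : i < lines.length then
    if pvBd lines[i] then i :: pvBIdx lines (i + 1) else pvBIdx lines (i + 1)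
  else []
termination_by lines.length - i

-- (boundary, next-boundary-or-length) pairs from i on
def pvPairs (lines : List String) (i : Nat) : List (Nat × Nat) :=
  if h : pvScanEnd lines i < lines.length then
    (pvScanEnd lines i, pvScanEnd lines (pvScanEnd lines i + 1)) :: pvPairs lines (pvScanEnd lines i + 1)
  else []
termination_by lines.length - i
decreasing_by
  have := pvScanEnd_le lines i; omega

theorem pvScanEnd_eq (lines : List String) (e : Nat) :
    pvScanEnd lines e =
      if e < lines.length then
        (if pvBd (lines.getD e "") then e else pvScanEnd lines (e + 1))
      else e := by
  conv_lhs => rw [pvScanEnd]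
  split
  · rename_i h
    rw [List.getD_eq_getElem?_getD, List.getElem?_eq_getElem h]
    rfl
  · rfl

theorem pvBIdx_eq (lines : List String) (i : Nat) :
    pvBIdx lines i =
      if i < lines.length then
        (if pvBd (lines.getD i "") then i :: pvBIdx lines (i + 1) else pvBIdx lines (i + 1))
      else [] := by
  conv_lhs => rw [pvBIdx]
  split
  · rename_i h
    rw [List.getD_eq_getElem?_getD, List.getElem?_eq_getElem h]
    rfl
  · rfl

theorem pvScanEnd_of_ge (lines : List String) (e : Nat) (h : lines.length ≤ e) :
    pvScanEnd lines e = e := by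
  rw [pvScanEnd_eq, if_neg (by omega)]

theorem pvScanEnd_bd (lines : List String) (e : Nat) :
    pvScanEnd lines e < lines.length → pvBd (lines.getD (pvScanEnd lines e) "") = true := by
  have H : ∀ n e, lines.length - e ≤ n →
      pvScanEnd lines e < lines.length → pvBd (lines.getD (pvScanEnd lines e) "") = true := by
    intro n
    induction n with
    | zero =>
      intro e he hlt
      rw [pvScanEnd_of_ge lines e (by omega)] at hlt
      omega
    | succ n ih =>
      intro e he hlt
      by_cases h : e < lines.length
      · by_cases hb : pvBd (lines.getD e "") = true
        · rw [pvScanEnd_eq, if_pos h, if_pos hb]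
          exact hb
        · rw [pvScanEnd_eq, if_pos h, if_neg hb] at hlt ⊢
          exact ih (e + 1) (by omega) hlt
      · rw [pvScanEnd_of_ge lines e (by omega)] at hlt
        omega
  exact fun hlt => H (lines.length - e) e (le_refl _) hlt

theorem pvScanEnd_idem (lines : List String) (e : Nat) :
    pvScanEnd lines (pvScanEnd lines e) = pvScanEnd lines e := by
  by_cases h : pvScanEnd lines e < lines.length
  · rw [pvScanEnd_eq, if_pos h, if_pos (pvScanEnd_bd lines e h)]
  · exact pvScanEnd_of_ge lines _ (by omega)

theorem pvScanEnd_le_len (lines : List String) (e : Nat) (h : e ≤ lines.length) :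
    pvScanEnd lines e ≤ lines.length := by
  have H : ∀ n e, lines.length - e ≤ n → e ≤ lines.length → pvScanEnd lines e ≤ lines.length := by
    intro n
    induction n with
    | zero =>
      intro e he hle
      rw [pvScanEnd_of_ge lines e (by omega)]
      omega
    | succ n ih =>
      intro e he hle
      by_cases h : e < lines.length
      · rw [pvScanEnd_eq, if_pos h]
        by_cases hb : pvBd (lines.getD e "") = true
        · rw [if_pos hb]; omega
        · rw [if_neg hb]; exact ih (e + 1) (by omega) (by omega)
      · rw [pvScanEnd_of_ge lines e (by omega)]; omega
  exact H (lines.length - e) e (le_refl _) h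

theorem pvPairs_eq (lines : List String) (i : Nat) :
    pvPairs lines i =
      if pvScanEnd lines i < lines.length then
        (pvScanEnd lines i, pvScanEnd lines (pvScanEnd lines i + 1)) :: pvPairs lines (pvScanEnd lines i + 1)
      else [] := by
  conv_lhs => rw [pvPairs]
  split
  · rfl
  · rfl

theorem pvPairs_congr (lines : List String) (a b : Nat)
    (h : pvScanEnd lines a = pvScanEnd lines b) : pvPairs lines a = pvPairs lines b := by
  rw [pvPairs_eq lines a, pvPairs_eq lines b, h]

theorem pvBIdx_scan (lines : List String) (i : Nat) :
    pvBIdx lines i =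
      if pvScanEnd lines i < lines.length then
        pvScanEnd lines i :: pvBIdx lines (pvScanEnd lines i + 1)
      else [] := by
  have H : ∀ n i, lines.length - i ≤ n →
      pvBIdx lines i =
        if pvScanEnd lines i < lines.length then
          pvScanEnd lines i :: pvBIdx lines (pvScanEnd lines i + 1)
        else [] := by
    intro n
    induction n with
    | zero =>
      intro i hi
      rw [pvBIdx_eq, if_neg (by omega), pvScanEnd_of_ge lines i (by omega), if_neg (by omega)]
    | succ n ih =>
      intro i hi
      by_cases h : i < lines.length
      · by_cases hb : pvBd (lines.getD i "") = true
        · rw [pvBIdx_eq, if_pos h, if_pos hb, pvScanEnd_eq, if_pos h, if_pos hb, if_pos h]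
        · rw [pvBIdx_eq, if_pos h, if_neg hb, pvScanEnd_eq, if_pos h, if_neg hb]
          exact ih (i + 1) (by omega)
      · rw [pvBIdx_eq, if_neg h, pvScanEnd_of_ge lines i (by omega), if_neg h]
  exact H (lines.length - i) i (le_refl _)

theorem pvPairs_eq_zip (lines : List String) (i : Nat) (hi : i ≤ lines.length) :
    pvPairs lines i = (pvBIdx lines i).zip ((pvBIdx lines i).drop 1 ++ [lines.length]) := by
  have H : ∀ n i, lines.length - i ≤ n → i ≤ lines.length →
      pvPairs lines i = (pvBIdx lines i).zip ((pvBIdx lines i).drop 1 ++ [lines.length]) := by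
    intro n
    induction n with
    | zero =>
      intro i hn hle
      rw [pvPairs_eq, if_neg (by rw [pvScanEnd_of_ge lines i (by omega)]; omega),
        pvBIdx_eq, if_neg (by omega)]
      simp
    | succ n ih =>
      intro i hn hle
      rw [pvPairs_eq, pvBIdx_scan]
      by_cases h : pvScanEnd lines i < lines.length
      · rw [if_pos h, if_pos h]
        have hj := pvScanEnd_le lines i
        have hIH := ih (pvScanEnd lines i + 1) (by omega) (by omega)
        rw [pvBIdx_scan lines (pvScanEnd lines i + 1)] at hIH ⊢
        by_cases h2 : pvScanEnd lines (pvScanEnd lines i + 1) < lines.length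
        · rw [if_pos h2] at hIH ⊢
          simp only [List.drop_succ_cons, List.drop_zero] at hIH ⊢
          rw [List.cons_append, List.zip_cons_cons, hIH]
        · rw [if_neg h2] at hIH ⊢
          have : pvScanEnd lines (pvScanEnd lines i + 1) = lines.length := by
            have := pvScanEnd_le_len lines (pvScanEnd lines i + 1) (by omega)
            omega
          rw [hIH, this]
          simp
      · rw [if_neg h, if_neg h]
        simp
  exact H (lines.length - i) i (le_refl _) hi

theorem pvALoop_eq (lines : List String) (blocks : PySem.Dict String (List String)) (i : Nat) :
    pvALoop lines blocks i =
      if i < lines.length then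
        (if PySem.Str.startswith (PySem.Str.lstrip (lines.getD i "")) "def eqn_" = true then
          pvALoop lines (pvStep lines blocks (i, pvScanEnd lines (i + 1))) (pvScanEnd lines (i + 1))
        else pvALoop lines blocks (i + 1))
      else blocks := by
  conv_lhs => rw [pvALoop]
  split
  · rename_i h
    simp only [pvStep, List.getD_eq_getElem?_getD, List.getElem?_eq_getElem h, Option.getD_some]
    split
    · rfl
    · rfl
  · rfl

theorem pvALoop_eq_foldl (lines : List String) (blocks : PySem.Dict String (List String)) (i : Nat) :
    pvALoop lines blocks i = List.foldl (pvStep lines) blocks (pvPairs lines i) := by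
  have H : ∀ n i blocks, lines.length - i ≤ n →
      pvALoop lines blocks i = List.foldl (pvStep lines) blocks (pvPairs lines i) := by
    intro n
    induction n with
    | zero =>
      intro i blocks hn
      rw [pvALoop_eq, if_neg (by omega), pvPairs_eq,
        if_neg (by rw [pvScanEnd_of_ge lines i (by omega)]; omega)]
      rfl
    | succ n ih =>
      intro i blocks hn
      by_cases h : i < lines.length
      · by_cases hd : PySem.Str.startswith (PySem.Str.lstrip (lines.getD i "")) "def eqn_" = true
        · have hbd : pvBd (lines.getD i "") = true := by
            unfold pvBd; rw [hd]; rfl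
          have hsi : pvScanEnd lines i = i := by
            rw [pvScanEnd_eq, if_pos h, if_pos hbd]
          have he := pvScanEnd_le lines (i + 1)
          rw [pvALoop_eq, if_pos h, if_pos hd, pvPairs_eq, hsi, if_pos h]
          rw [List.foldl_cons]
          rw [ih (pvScanEnd lines (i + 1)) _ (by omega)]
          exact congrArg _ (pvPairs_congr lines _ _ (pvScanEnd_idem lines (i + 1)))
        · rw [pvALoop_eq, if_pos h, if_neg hd]
          by_cases hbd : pvBd (lines.getD i "") = true
          · have hsi : pvScanEnd lines i = i := by
              rw [pvScanEnd_eq, if_pos h, if_pos hbd]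
            rw [pvPairs_eq, hsi, if_pos h, List.foldl_cons]
            have hstep : pvStep lines blocks (i, pvScanEnd lines (i + 1)) = blocks := by
              unfold pvStep
              rw [if_neg hd]
            rw [hstep]
            exact ih (i + 1) blocks (by omega)
          · have hsi : pvScanEnd lines i = pvScanEnd lines (i + 1) := by
              rw [pvScanEnd_eq, if_pos h, if_neg hbd]
            rw [pvPairs_congr lines i (i + 1) hsi]
            exact ih (i + 1) blocks (by omega)
      · rw [pvALoop_eq, if_neg h, pvPairs_eq,
          if_neg (by rw [pvScanEnd_of_ge lines i (by omega)]; omega)]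
        rfl
  exact H (lines.length - i) i blocks (le_refl _)

theorem pvEnum_filter_aux (lines : List String) :
    ∀ n k, lines.length - k ≤ n →
    (((PySem.List.enumerate (lines.drop k) (k : Int)).filter
        (fun p => PySem.Str.startswith (PySem.Str.lstrip p.2) "def eqn_" ||
                  PySem.Str.startswith (PySem.Str.lstrip p.2) "@staticmethod")).map (·.1))
      = (pvBIdx lines k).map Int.ofNat := by
  intro n
  induction n with
  | zero =>
    intro k hk
    rw [List.drop_eq_nil_of_le (by omega), pvBIdx_eq, if_neg (by omega)]
    simp [PySem.List.enumerate]
  | succ n ih =>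
    intro k hk
    by_cases h : k < lines.length
    · rw [List.drop_eq_getElem_cons h, PySem.List.enumerate_cons]
      have hcast : (k : Int) + 1 = ((k + 1 : Nat) : Int) := by push_cast; ring
      rw [hcast, pvBIdx_eq, if_pos h, List.getD_eq_getElem?_getD, List.getElem?_eq_getElem h]
      dsimp only [Option.getD_some]
      rw [List.filter_cons]
      by_cases hb : pvBd lines[k] = true
      · rw [if_pos hb, if_pos (show (PySem.Str.startswith (PySem.Str.lstrip ((k : Int), lines[k]).2) "def eqn_" ||
              PySem.Str.startswith (PySem.Str.lstrip ((k : Int), lines[k]).2) "@staticmethod") = true from hb)]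
        rw [List.map_cons, ih (k + 1) (by omega)]
        rfl
      · rw [if_neg hb, if_neg (show ¬ (PySem.Str.startswith (PySem.Str.lstrip ((k : Int), lines[k]).2) "def eqn_" ||
              PySem.Str.startswith (PySem.Str.lstrip ((k : Int), lines[k]).2) "@staticmethod") = true from hb)]
        exact ih (k + 1) (by omega)
    · rw [List.drop_eq_nil_of_le (by omega), pvBIdx_eq, if_neg (by omega)]
      simp [PySem.List.enumerate]

theorem pvStep_cast (lines : List String) (acc : PySem.Dict String (List String)) (j e : Nat) :
    (fun (acc : PySem.Dict String (List String)) (p : Int × Int) =>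
      let s := PySem.Str.lstrip (PySem.List.pyGetD lines p.1 "")
      if PySem.Str.startswith s "def eqn_" then
        let name := PySem.Str.strip
          (((PySem.Str.splitMax? (((PySem.Str.splitMax? s "def " 1).getD []).getD 1 "") "(" 1).getD []).getD 0 "")
        let start := if 0 < p.1 ∧ PySem.Str.startswith (PySem.Str.lstrip (PySem.List.pyGetD lines (p.1 - 1) "")) "@" = true then p.1 - 1 else p.1
        acc.insert name (PySem.List.slice lines (some start) (some p.2))
      else acc) acc ((j : Int), (e : Int)) = pvStep lines acc (j, e) := by
  dsimp only
  rw [PySem.List.pyGetD_natCast]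
  unfold pvStep
  by_cases hd : PySem.Str.startswith (PySem.Str.lstrip (lines.getD j "")) "def eqn_" = true
  · rw [if_pos hd, if_pos hd]
    by_cases hj : 0 < j
    · have hc : (j : Int) - 1 = ((j - 1 : Nat) : Int) := by omega
      rw [hc, PySem.List.pyGetD_natCast]
      by_cases ha : PySem.Str.startswith (PySem.Str.lstrip (lines.getD (j - 1) "")) "@" = true
      · rw [if_pos ⟨Int.natCast_pos.mpr hj, ha⟩, if_pos ⟨hj, ha⟩]
      · rw [if_neg (fun h => ha h.2), if_neg (fun h => ha h.2)]
    · rw [if_neg (fun h => hj (Int.natCast_pos.mp h.1)), if_neg (fun h => hj h.1)]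
  · rw [if_neg hd, if_neg hd]

theorem pvStep_cast' (lines : List String) :
    (fun (acc : PySem.Dict String (List String)) (y : Nat × Nat) =>
      (fun (acc : PySem.Dict String (List String)) (p : Int × Int) =>
        let s := PySem.Str.lstrip (PySem.List.pyGetD lines p.1 "")
        if PySem.Str.startswith s "def eqn_" then
          let name := PySem.Str.strip
            (((PySem.Str.splitMax? (((PySem.Str.splitMax? s "def " 1).getD []).getD 1 "") "(" 1).getD []).getD 0 "")
          let start := if 0 < p.1 ∧ PySem.Str.startswith (PySem.Str.lstrip (PySem.List.pyGetD lines (p.1 - 1) "")) "@" = true then p.1 - 1 else p.1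
          acc.insert name (PySem.List.slice lines (some start) (some p.2))
        else acc) acc (Prod.map Int.ofNat Int.ofNat y)) = pvStep lines :=
  funext fun acc => funext fun y => by
    obtain ⟨j, e⟩ := y
    exact pvStep_cast lines acc j e

-- ===== VERDICT (by name: the statement is the Claim_ definition above) =====
set_option maxHeartbeats 1000000 in
theorem extract_method_blocks_spec : Claim_equal_extract_method_blocks := by
  intro ct _
  unfold Spec_extract_method_blocks extract_method_blocks extract_method_blocks_alt
  dsimp only
  rw [pvALoop_eq_foldl, pvPairs_eq_zip _ 0 (Nat.zero_le _)]
  have hb := pvEnum_filter_aux (PySem.Str.splitlines ct) (PySem.Str.splitlines ct).length 0 (by omega)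
  rw [List.drop_zero, Nat.cast_zero] at hb
  rw [hb]
  rw [show ([((PySem.Str.splitlines ct).length : Int)] : List Int)
      = List.map Int.ofNat [(PySem.Str.splitlines ct).length] from rfl]
  rw [← List.map_drop, ← List.map_append, List.zip_map, List.foldl_map]
  rw [pvStep_cast']
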